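-- pv_equiv track=rewrite | github.com/yongchanson/zb | zb1/codingTest/220317/(2)SecondLargestBinaryNumber/SecondLargestBinaryNumber.py | getSecondLargestBitNumber
-- ===== SOURCE A (Python) =====
-- def getSecondLargestBitNumber(n):
--     pivot = 1 << 15
--     count = 0
--
--     while pivot > 0:
--         if pivot & n:
--             count += 1
--             if count == 2: return pivot
--
--         pivot >>= 1
--
--     return 0
-- ===== SOURCE B (Python) =====
-- def getSecondLargestBitNumber(n):
--     m = n & 0xFFFF                      # A only examines bits 0..15 (two's complement for negative n)
--     if m == 0:
--         return 0
--     m ^= 1 << (m.bit_length() - 1)      # clear the highest set bit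
--     if m == 0:
--         return 0
--     return 1 << (m.bit_length() - 1)    # highest remaining set bit = second-highest of n
-- ===== Notes on version B (the rewrite author's own statement) =====
-- stated objective: simpler
-- what changed: Replaces A's fixed scan-and-count loop over pivot bits (highest to lowest) with direct bit arithmetic: mask n to the low bits A examines, clear the highest set bit via bit_length, and return the highest bit of the remainder.
import Mathlib
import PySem

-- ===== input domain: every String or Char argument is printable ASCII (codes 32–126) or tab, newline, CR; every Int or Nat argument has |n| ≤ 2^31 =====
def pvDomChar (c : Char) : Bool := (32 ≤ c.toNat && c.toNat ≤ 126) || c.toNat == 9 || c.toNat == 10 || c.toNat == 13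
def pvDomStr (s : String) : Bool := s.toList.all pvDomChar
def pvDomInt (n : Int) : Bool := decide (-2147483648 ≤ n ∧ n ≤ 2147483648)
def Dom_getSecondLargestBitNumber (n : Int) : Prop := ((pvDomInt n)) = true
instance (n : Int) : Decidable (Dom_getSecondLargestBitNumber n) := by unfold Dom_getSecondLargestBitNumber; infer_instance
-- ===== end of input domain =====

-- B replaces A's scan-and-count loop over pivot bits by direct bit arithmetic on the masked
-- value: clear the highest set bit found via bit_length, return the next one (objective: simpler).

-- ===== PORT A =====
-- A's while-loop, transliterated; the fuel argument (17) only makes the recursion total: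
-- pivot starts at 2^15 and halves each iteration, so the loop runs at most 16 times.
def pvLoopA : Nat → Int → Int → Int → Int
  | 0, _, _, _ => 0
  | fuel+1, n, pivot, count =>
    if 0 < pivot then
      if PySem.Int.band pivot n ≠ 0 then
        if count + 1 = 2 then pivot
        else pvLoopA fuel n (pivot >>> (1:Nat)) (count + 1)
      else pvLoopA fuel n (pivot >>> (1:Nat)) count
    else 0

def getSecondLargestBitNumber (n : Int) : Int := pvLoopA 17 n ((1:Int) <<< (15:Nat)) 0

-- ===== PORT B =====
-- transliteration of Source B: mask to 16 bits, clear the top set bit, return the top of the rest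
def getSecondLargestBitNumber_alt (n : Int) : Int :=
  let m := PySem.Int.band n 65535
  if m = 0 then 0
  else
    let m2 := PySem.Int.bxor m ((1 : Int) <<< (PySem.Int.bitLength m - 1))
    if m2 = 0 then 0 else (1 : Int) <<< (PySem.Int.bitLength m2 - 1)

-- ===== PRECONDITION & SPEC =====
def Spec_getSecondLargestBitNumber (n : Int) (out : Int) : Prop := out = getSecondLargestBitNumber_alt n
instance (n : Int) (out : Int) : Decidable (Spec_getSecondLargestBitNumber n out) := by unfold Spec_getSecondLargestBitNumber; infer_instance

-- ===== CLAIM (what is proved, stated in full; the proofs are below) =====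
def Claim_equal_getSecondLargestBitNumber : Prop := ∀ (n : Int), Dom_getSecondLargestBitNumber n → Spec_getSecondLargestBitNumber n (getSecondLargestBitNumber n)

-- ===== LEMMAS AND PROOFS =====

lemma pvTestBit_div_mod (m i : Nat) : m.testBit i = decide (m / 2^i % 2 = 1) := by
  rw [Nat.testBit, Nat.shiftRight_eq_div_pow, Nat.land_comm, Nat.and_one_is_mod]
  rcases Nat.mod_two_eq_zero_or_one (m / 2^i) with h | h <;> simp [h]

lemma pvCompl : ∀ (w x : Nat), x < 2^w → 2^w - 1 - x = (2^w - 1) ^^^ x := by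
  intro w
  induction w with
  | zero => intro x hx; interval_cases x; decide
  | succ w ih =>
    intro x hx
    have hdecomp : x = Nat.bit (x % 2 == 1) (x / 2) := by
      simp [Nat.bit]; rcases Nat.mod_two_eq_zero_or_one x with h | h <;> simp [h] <;> omega
    have htop : 2^(w+1) - 1 = Nat.bit true (2^w - 1) := by
      simp [Nat.bit]; have : 0 < 2^w := Nat.two_pow_pos w; ring_nf; omega
    rw [hdecomp, htop, Nat.xor_bit, ← ih (x/2) (by omega)]
    rcases Nat.mod_two_eq_zero_or_one x with h | h <;> simp [Nat.bit, h] <;> omega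

lemma pvModSucc (m j : Nat) : m % 2^(j+1) = m % 2^j + 2^j * (if m.testBit j then 1 else 0) := by
  have h1 : m % 2^(j+1) = m % 2^j + 2^j * (m / 2^j % 2) := by
    rw [Nat.pow_succ, Nat.mod_mul]
  rw [h1, pvTestBit_div_mod]
  rcases Nat.mod_two_eq_zero_or_one (m / 2^j) with h | h <;> simp [h]

lemma pvLog2_eq {r j : Nat} (h1 : 2^j ≤ r) (h2 : r < 2^(j+1)) : r.log2 = j := by
  have hr : r ≠ 0 := by have := Nat.two_pow_pos j; omega
  have a1 := Nat.log2_self_le hr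
  have a2 := Nat.lt_log2_self (n := r)
  have b1 : r.log2 < j + 1 := by
    by_contra hc
    have : 2^(j+1) ≤ 2^r.log2 := Nat.pow_le_pow_right (by norm_num) (by omega)
    omega
  have b2 : j < r.log2 + 1 := by
    by_contra hc
    have : 2^(r.log2+1) ≤ 2^j := Nat.pow_le_pow_right (by norm_num) (by omega)
    omega
  omega

lemma pvTestBit_log2 {m : Nat} (h : 0 < m) : m.testBit m.log2 = true := by
  rw [pvTestBit_div_mod]
  have a1 := Nat.log2_self_le (by omega : m ≠ 0)
  have a2 := Nat.lt_log2_self (n := m)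
  have : m / 2^m.log2 = 1 := by
    rw [Nat.pow_succ] at a2
    have hp := Nat.two_pow_pos m.log2
    have hlo : 1 ≤ m / 2^m.log2 := Nat.one_le_div_iff hp |>.mpr a1
    have hhi : m / 2^m.log2 < 2 := Nat.div_lt_of_lt_mul (by omega)
    omega
  simp [this]

lemma pvXorTop {m : Nat} (h : 0 < m) : m ^^^ 2^m.log2 = m % 2^m.log2 := by
  apply Nat.eq_of_testBit_eq; intro i
  rw [Nat.testBit_xor, Nat.testBit_mod_two_pow, Nat.testBit_two_pow]
  by_cases hi : i = m.log2
  · subst hi; simp [pvTestBit_log2 h]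
  · by_cases hlt : i < m.log2
    · simp [hlt, Ne.symm hi]
    · have : m.testBit i = false := by
        apply Nat.testBit_lt_two_pow
        calc m < 2^(m.log2+1) := Nat.lt_log2_self
        _ ≤ 2^i := Nat.pow_le_pow_right (by norm_num) (by omega)
      simp [this, hlt, Ne.symm hi]

def pvMask (n : Int) : Nat := (PySem.Int.band n 65535).toNat

lemma pvMask_eq (n : Int) : PySem.Int.band n 65535 = (pvMask n : Int) := by
  unfold pvMask PySem.Int.band
  split_ifs with h1 h2 <;> simp <;> omega

lemma pvMask_lt (n : Int) : pvMask n < 65536 := by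
  unfold pvMask PySem.Int.band
  split_ifs with h1 h2 <;> simp
  · have := Nat.and_le_right (n := n.toNat) (m := (65535:Int).toNat)
    simp at this ⊢; omega
  · omega
  · omega

-- the j-th test of A's loop reads bit j of the 16-bit mask of n
lemma pvTest (n : Int) (j : Nat) (hj : j < 16) :
    (PySem.Int.band ((2:Int)^j) n ≠ 0) ↔ (pvMask n).testBit j = true := by
  have hcast : ((2:Int)^j) = ((2^j : Nat) : Int) := by push_cast; ring
  by_cases hn : 0 ≤ n
  · unfold pvMask PySem.Int.band
    rw [hcast]
    rw [if_pos (by positivity), if_pos hn, if_pos hn, if_pos (by norm_num)]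
    simp only [Int.toNat_natCast]
    have e : (65535:Int).toNat = 2^16 - 1 := by decide
    rw [e, Nat.and_two_pow_sub_one_eq_mod]
    rw [Nat.land_comm, Nat.and_two_pow]
    simp
    show n.toNat.testBit j = (n.toNat % 65536).testBit j
    have e2 : (65536:Nat) = 2^16 := by norm_num
    rw [e2, Nat.testBit_mod_two_pow]
    simp [hj]
  · unfold pvMask PySem.Int.band
    rw [hcast]
    rw [if_pos (by positivity), if_neg hn, if_neg hn, if_pos (by norm_num)]
    simp only [Int.toNat_natCast]
    set k := (-n - 1).toNat with hk
    have e : (65535:Int).toNat = 2^16 - 1 := by decide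
    rw [e]
    rw [Nat.land_comm (2^16-1) k, Nat.and_two_pow_sub_one_eq_mod]
    rw [Nat.land_comm (2^j) k, Nat.and_two_pow]
    have hx : k % 2^16 < 2^16 := Nat.mod_lt _ (by norm_num)
    have hcompl : (2^16 - 1 - k % 2^16) = (2^16-1) ^^^ (k % 2^16) := pvCompl 16 _ hx
    rw [hcompl]
    rw [Nat.testBit_xor, Nat.testBit_mod_two_pow]
    have h1 : (2^16 - 1 : Nat).testBit j = true := by
      rw [Nat.testBit_two_pow_sub_one]; simpa using hj
    rw [h1]
    simp [hj]
    cases hb : k.testBit j <;> simp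

lemma pvShiftPow (j : Nat) : ((2:Int)^(j+1)) >>> (1:Nat) = (2:Int)^j := by
  rw [Int.shiftRight_eq_div_pow]
  rw [pow_succ]
  simp

-- A's loop from pivot 2^j with count already 1: highest set bit of m % 2^(j+1)
lemma pvLoop_one : ∀ (j : Nat), j < 16 → ∀ n : Int,
    pvLoopA (j+2) n ((2:Int)^j) 1 =
      (if pvMask n % 2^(j+1) = 0 then 0 else ((2^((pvMask n % 2^(j+1)).log2) : Nat) : Int)) := by
  intro j
  induction j with
  | zero =>
    intro _ n
    have ht := pvTest n 0 (by norm_num)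
    have hm := pvModSucc (pvMask n) 0
    have h10 : (1:Int) >>> (1:Nat) = 0 := by decide
    simp only [pvLoopA, pow_zero]
    simp only [pow_zero, Nat.mod_one, one_mul] at hm
    cases hb : (pvMask n).testBit 0
    · rw [hb] at ht
      simp at ht
      simp [ht, h10]
      simp [hb] at hm
      simp [hm]
    · rw [hb] at ht
      have hne : PySem.Int.band 1 n ≠ 0 := by
        have := ht.mpr rfl; simpa using this
      simp [hne]
      simp [hb] at hm
      rw [hm]
      decide
  | succ j ih =>
    intro hj n
    have ht := pvTest n (j+1) hj
    have hm := pvModSucc (pvMask n) (j+1)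
    have hpos : (0:Int) < 2^(j+1) := by positivity
    show pvLoopA (j+2+1) n ((2:Int)^(j+1)) 1 = _
    rw [pvLoopA]
    rw [if_pos hpos]
    cases hb : (pvMask n).testBit (j+1)
    · rw [hb] at ht; simp at ht
      have ht' : ¬ (PySem.Int.band ((2:Int)^(j+1)) n ≠ 0) := by simp [ht]
      rw [if_neg ht', pvShiftPow]
      rw [ih (by omega) n]
      simp [hb] at hm
      rw [hm]
    · rw [hb] at ht
      have hne : PySem.Int.band ((2:Int)^(j+1)) n ≠ 0 := ht.mpr rfl
      rw [if_pos hne, if_pos (by norm_num)]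
      rw [if_pos hb, mul_one] at hm
      have hlt : pvMask n % 2^(j+1+1) < 2^(j+1+1) := Nat.mod_lt _ (by positivity)
      have hge : 2^(j+1) ≤ pvMask n % 2^(j+1+1) := by omega
      have hlog : (pvMask n % 2^(j+1+1)).log2 = j+1 := pvLog2_eq hge hlt
      rw [if_neg (by have := Nat.two_pow_pos (j+1); omega), hlog]
      push_cast
      ring

-- A's loop from pivot 2^j with count 0: second-highest set bit of m % 2^(j+1)
lemma pvLoop_zero : ∀ (j : Nat), j < 16 → ∀ n : Int,
    pvLoopA (j+2) n ((2:Int)^j) 0 =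
      (if pvMask n % 2^(j+1) = 0 then 0 else
        (if (pvMask n % 2^(j+1)) % 2^((pvMask n % 2^(j+1)).log2) = 0 then 0 else
          ((2^(((pvMask n % 2^(j+1)) % 2^((pvMask n % 2^(j+1)).log2)).log2) : Nat) : Int))) := by
  intro j
  induction j with
  | zero =>
    intro _ n
    have ht := pvTest n 0 (by norm_num)
    have hm := pvModSucc (pvMask n) 0
    have h10 : (1:Int) >>> (1:Nat) = 0 := by decide
    simp only [pvLoopA, pow_zero]
    simp only [pow_zero, Nat.mod_one, one_mul] at hm
    cases hb : (pvMask n).testBit 0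
    · rw [hb] at ht; simp at ht
      simp [ht, h10]
      simp [hb] at hm
      simp [hm]
    · rw [hb] at ht
      have hne : PySem.Int.band 1 n ≠ 0 := by
        have := ht.mpr rfl; simpa using this
      simp [hne, h10]
      simp [hb] at hm
      rw [hm]
      decide
  | succ j ih =>
    intro hj n
    have ht := pvTest n (j+1) hj
    have hm := pvModSucc (pvMask n) (j+1)
    have hpos : (0:Int) < 2^(j+1) := by positivity
    show pvLoopA (j+2+1) n ((2:Int)^(j+1)) 0 = _
    rw [pvLoopA]
    rw [if_pos hpos]
    cases hb : (pvMask n).testBit (j+1)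
    · rw [hb] at ht; simp at ht
      have ht' : ¬ (PySem.Int.band ((2:Int)^(j+1)) n ≠ 0) := by simp [ht]
      rw [if_neg ht', pvShiftPow]
      rw [ih (by omega) n]
      simp [hb] at hm
      rw [hm]
    · rw [hb] at ht
      have hne : PySem.Int.band ((2:Int)^(j+1)) n ≠ 0 := ht.mpr rfl
      rw [if_pos hne, if_neg (by norm_num), pvShiftPow]
      simp only [zero_add]
      rw [pvLoop_one j (by omega) n]
      rw [if_pos hb, mul_one] at hm
      have hlt : pvMask n % 2^(j+1+1) < 2^(j+1+1) := Nat.mod_lt _ (by positivity)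
      have hge : 2^(j+1) ≤ pvMask n % 2^(j+1+1) := by omega
      have hlog : (pvMask n % 2^(j+1+1)).log2 = j+1 := pvLog2_eq hge hlt
      have hmod : (pvMask n % 2^(j+1+1)) % 2^(j+1) = pvMask n % 2^(j+1) := by
        rw [hm, Nat.add_mod_right, Nat.mod_mod_of_dvd _ dvd_rfl]
      have hr0 : ¬ (pvMask n % 2^(j+1+1) = 0) := by
        have := Nat.two_pow_pos (j+1); omega
      conv_rhs => rw [if_neg hr0, hlog, hmod]

-- PySem.Int.bitLength on a positive Nat cast is log2 + 1
lemma pvBitLength (m : Nat) (h : 0 < m) : PySem.Int.bitLength (m : Int) = m.log2 + 1 := by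
  induction m using Nat.strong_induction_on with
  | _ m ih =>
    rcases Nat.lt_or_ge m 2 with h2 | h2
    · have : m = 1 := by omega
      subst this
      have := PySem.Int.bitLength_natCast (m := 1) (by norm_num)
      simpa using this
    · have hrec := PySem.Int.bitLength_natCast (m := m) (by omega)
      rw [hrec, ih (m/2) (by omega) (by omega)]
      have hd : m / 2 ≠ 0 := by omega
      have a1 := Nat.log2_self_le hd
      have a2 := Nat.lt_log2_self (n := m / 2)
      have e1 : (2:Nat)^((m/2).log2 + 1) = 2 * 2^((m/2).log2) := by ring
      have e2 : (2:Nat)^((m/2).log2 + 1 + 1) = 4 * 2^((m/2).log2) := by ring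
      have : m.log2 = (m/2).log2 + 1 := pvLog2_eq (by omega) (by omega)
      omega

lemma pvShl (e : Nat) : (1:Int) <<< e = ((2^e : Nat) : Int) := by simp [Int.shiftLeft_eq]

-- B computes the same second-highest-bit expression from the mask
lemma pvAlt_char (n : Int) :
    getSecondLargestBitNumber_alt n =
      (if pvMask n = 0 then 0 else
        (if (pvMask n) % 2^((pvMask n).log2) = 0 then 0 else
          ((2^(((pvMask n) % 2^((pvMask n).log2)).log2) : Nat) : Int))) := by
  simp only [getSecondLargestBitNumber_alt]
  rw [pvMask_eq n]
  by_cases h0 : pvMask n = 0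
  · simp [h0]
  · have hpos : 0 < pvMask n := Nat.pos_of_ne_zero h0
    have hm0 : ¬ ((pvMask n : Int) = 0) := by exact_mod_cast h0
    rw [if_neg hm0, if_neg h0]
    rw [pvBitLength _ hpos, Nat.add_sub_cancel, pvShl]
    rw [PySem.Int.bxor_natCast]
    rw [pvXorTop hpos]
    by_cases h2 : (pvMask n) % 2^((pvMask n).log2) = 0
    · simp [h2]
    · have hpos2 : 0 < (pvMask n) % 2^((pvMask n).log2) := Nat.pos_of_ne_zero h2
      have hm2 : ¬ (((pvMask n % 2^((pvMask n).log2) : Nat) : Int) = 0) := by exact_mod_cast h2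
      rw [if_neg hm2, if_neg h2]
      rw [pvBitLength _ hpos2, Nat.add_sub_cancel, pvShl]

-- ===== VERDICT (by name: the statement is the Claim_ definition above) =====
theorem getSecondLargestBitNumber_spec : Claim_equal_getSecondLargestBitNumber := by
  intro n _
  unfold Spec_getSecondLargestBitNumber
  unfold getSecondLargestBitNumber
  have hshl : (1:Int) <<< (15:Nat) = (2:Int)^15 := by decide
  rw [hshl]
  have h15 : (17:Nat) = 15+2 := by norm_num
  rw [h15, pvLoop_zero 15 (by norm_num) n]
  have hm : pvMask n % 2^(15+1) = pvMask n := Nat.mod_eq_of_lt (by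
    have := pvMask_lt n; norm_num; omega)
  rw [hm, pvAlt_char n]
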